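-- pv_equiv track=rewrite | github.com/Xopoko/Experiment-4 | scripts/q2_2_prefix_state_lib.py | path_vertices
-- ===== SOURCE A (Python) =====
-- from typing import Dict, Iterable, List, Sequence, Tuple
--
-- DIRS: Tuple[Tuple[int, int, int], ...] = (
--     (1, 0, 0),
--     (-1, 0, 0),
--     (0, 1, 0),
--     (0, -1, 0),
--     (0, 0, 1),
--     (0, 0, -1),
-- )
--
-- def path_vertices(seq: Sequence[int]) -> List[Tuple[int, int, int]]:
--     pos = (0, 0, 0)
--     vertices = [pos]
--     for idx in seq:
--         step = DIRS[idx]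
--         pos = (pos[0] + step[0], pos[1] + step[1], pos[2] + step[2])
--         vertices.append(pos)
--     return vertices
-- ===== SOURCE B (Python) =====
-- DIRS = (
--     (1, 0, 0),
--     (-1, 0, 0),
--     (0, 1, 0),
--     (0, -1, 0),
--     (0, 0, 1),
--     (0, 0, -1),
-- )
--
-- def _prefix(vals):
--     out = [0]
--     total = 0
--     for v in vals:
--         total += v
--         out.append(total)
--     return out
--
-- def path_vertices(seq):
--     steps = [DIRS[i] for i in seq]
--     xs = _prefix([s[0] for s in steps])
--     ys = _prefix([s[1] for s in steps])
--     zs = _prefix([s[2] for s in steps])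
--     return list(zip(xs, ys, zs))
-- ===== Notes on version B (the rewrite author's own statement) =====
-- stated objective: alternative
-- what changed: Replaces the single interleaved mutating loop over 3-tuples with a per-axis decomposition: resolve all steps once, compute three independent prefix-sum lists (x, y, z), and zip them into the vertex list.
import Mathlib
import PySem

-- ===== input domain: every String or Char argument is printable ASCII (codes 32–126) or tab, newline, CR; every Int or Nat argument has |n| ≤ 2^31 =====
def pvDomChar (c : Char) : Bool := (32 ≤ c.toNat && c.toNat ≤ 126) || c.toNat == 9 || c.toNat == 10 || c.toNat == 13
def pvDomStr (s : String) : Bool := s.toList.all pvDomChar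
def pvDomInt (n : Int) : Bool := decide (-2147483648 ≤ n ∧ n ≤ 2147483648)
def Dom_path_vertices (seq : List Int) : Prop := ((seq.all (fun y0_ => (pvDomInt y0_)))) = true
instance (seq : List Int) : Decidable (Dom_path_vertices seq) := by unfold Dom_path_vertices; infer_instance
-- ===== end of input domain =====

-- B rewrites A's single interleaved loop as three per-axis prefix sums zipped together; same cost, different decomposition.

-- ===== PORT A =====
def pvDIRS : List (Int × Int × Int) :=
  [(1, 0, 0), (-1, 0, 0), (0, 1, 0), (0, -1, 0), (0, 0, 1), (0, 0, -1)]

-- the for-loop of A; `pyGet?` is Python indexing (negative wrap); the getD default is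
-- unreachable under Pre_ (Python raises IndexError there, excluded by Pre_)
def pvLoopA (rest : List Int) (pos : Int × Int × Int) (vertices : List (Int × Int × Int)) :
    List (Int × Int × Int) :=
  match rest with
  | [] => vertices
  | idx :: rest' =>
    let step := (PySem.List.pyGet? pvDIRS idx).getD (0, 0, 0)
    let pos' := (pos.1 + step.1, pos.2.1 + step.2.1, pos.2.2 + step.2.2)
    pvLoopA rest' pos' (vertices ++ [pos'])

def path_vertices (seq : List Int) : List (Int × Int × Int) :=
  pvLoopA seq (0, 0, 0) [(0, 0, 0)]

-- ===== PORT B =====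
-- _prefix of Source B: out=[0]; total=0; for v in vals: total+=v; out.append(total)
def pvPrefix (vals : List Int) : List Int :=
  (vals.foldl (fun (st : List Int × Int) v => (st.1 ++ [st.2 + v], st.2 + v)) ([0], 0)).1

def path_vertices_alt (seq : List Int) : List (Int × Int × Int) :=
  let steps := seq.map (fun i => (PySem.List.pyGet? pvDIRS i).getD (0, 0, 0))
  let xs := pvPrefix (steps.map (fun s => s.1))
  let ys := pvPrefix (steps.map (fun s => s.2.1))
  let zs := pvPrefix (steps.map (fun s => s.2.2))
  xs.zip (ys.zip zs)

-- ===== PRECONDITION & SPEC =====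
-- Pre_ excludes exactly the inputs where Python A raises IndexError (an index outside -6..5).
def Pre_path_vertices (seq : List Int) : Prop := ∀ i ∈ seq, -6 ≤ i ∧ i < 6
instance (seq : List Int) : Decidable (Pre_path_vertices seq) := by unfold Pre_path_vertices; infer_instance
def pvWitness_path_vertices : List Int := [0, 2, 4, -1, 5]

def Spec_path_vertices (seq : List Int) (out : List (Int × Int × Int)) : Prop := out = path_vertices_alt seq
instance (seq : List Int) (out : List (Int × Int × Int)) : Decidable (Spec_path_vertices seq out) := by unfold Spec_path_vertices; infer_instance

-- ===== CLAIM (what is proved, stated in full; the proofs are below) =====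
def Claim_equal_path_vertices : Prop := ∀ (seq : List Int), Dom_path_vertices seq → Pre_path_vertices seq → Spec_path_vertices seq (path_vertices seq)

-- ===== LEMMAS AND PROOFS =====

-- resolved step for index i
def pvStep (i : Int) : Int × Int × Int := (PySem.List.pyGet? pvDIRS i).getD (0, 0, 0)

-- reference scan: successive positions after each step, starting (exclusive) from pos
def pvScan (steps : List (Int × Int × Int)) (pos : Int × Int × Int) : List (Int × Int × Int) :=
  match steps with
  | [] => []
  | s :: rest =>
    let p := (pos.1 + s.1, pos.2.1 + s.2.1, pos.2.2 + s.2.2)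
    p :: pvScan rest p

-- integer scan for one axis
def pvIScan (vals : List Int) (t : Int) : List Int :=
  match vals with
  | [] => []
  | v :: rest => (t + v) :: pvIScan rest (t + v)

theorem pvLoopA_eq_scan (rest : List Int) (pos : Int × Int × Int) (acc : List (Int × Int × Int)) :
    pvLoopA rest pos acc = acc ++ pvScan (rest.map pvStep) pos := by
  induction rest generalizing pos acc with
  | nil => simp [pvLoopA, pvScan]
  | cons i r ih => simp [pvLoopA, pvScan, pvStep, ih]

theorem pvPrefix_foldl (vals : List Int) (acc : List Int) (t : Int) :
    vals.foldl (fun (st : List Int × Int) v => (st.1 ++ [st.2 + v], st.2 + v)) (acc, t)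
      = (acc ++ pvIScan vals t, t + vals.sum) := by
  induction vals generalizing acc t with
  | nil => simp [pvIScan]
  | cons v r ih => simp [pvIScan, ih]; ring

theorem pvPrefix_eq (vals : List Int) : pvPrefix vals = 0 :: pvIScan vals 0 := by
  simp [pvPrefix, pvPrefix_foldl]

theorem zip_iscan_eq_scan (steps : List (Int × Int × Int)) (pos : Int × Int × Int) :
    (pvIScan (steps.map (fun s => s.1)) pos.1).zip
      ((pvIScan (steps.map (fun s => s.2.1)) pos.2.1).zip
        (pvIScan (steps.map (fun s => s.2.2)) pos.2.2))
      = pvScan steps pos := by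
  induction steps generalizing pos with
  | nil => simp [pvIScan, pvScan]
  | cons s r ih =>
    simp only [pvIScan, pvScan, List.map_cons, List.zip_cons_cons]
    exact congrArg _ (ih (pos.1 + s.1, pos.2.1 + s.2.1, pos.2.2 + s.2.2))

theorem path_vertices_alt_eq (seq : List Int) :
    path_vertices_alt seq = (0, 0, 0) :: pvScan (seq.map pvStep) (0, 0, 0) := by
  have h := zip_iscan_eq_scan (seq.map pvStep) (0, 0, 0)
  simp only [List.map_map] at h
  simp only [path_vertices_alt, pvPrefix_eq, List.map_map, List.zip_cons_cons]
  exact congrArg _ h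

-- ===== VERDICT (by name: the statement is the Claim_ definition above) =====
theorem path_vertices_spec : Claim_equal_path_vertices := by
  intro seq _ _
  unfold Spec_path_vertices path_vertices
  rw [pvLoopA_eq_scan, path_vertices_alt_eq]
  rfl
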